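-- pv_equiv track=rewrite | github.com/AmiltonCabral/programacao-1 | Unidade 07/afinidade-musical/solucao.py | tem_afinidade
-- ===== SOURCE A (Python) =====
-- def tem_afinidade(lst1, lst2):
--     afinidades = 0
--     saida = False
--     for artista_1 in lst1:
--         for artista_2 in lst2:
--             if artista_1 == artista_2:
--                 afinidades += 1
--     if afinidades >= 3:
--         saida = True
--
--     return saida
-- ===== SOURCE B (Python) =====
-- def tem_afinidade(lst1, lst2):
--     a = sorted(lst1)
--     b = sorted(lst2)
--     total = 0
--     i = 0
--     j = 0
--     while i < len(a) and j < len(b):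
--         if a[i] == b[j]:
--             v = a[i]
--             i0 = i
--             while i < len(a) and a[i] == v:
--                 i += 1
--             j0 = j
--             while j < len(b) and b[j] == v:
--                 j += 1
--             total += (i - i0) * (j - j0)
--         elif a[i] < b[j]:
--             i += 1
--         else:
--             j += 1
--     return total >= 3
-- ===== Notes on version B (the rewrite author's own statement) =====
-- stated objective: faster
-- what changed: Replaces A's nested double scan with sort-both-copies followed by a two-pointer merge that advances past equal runs, adding run_len1*run_len2 per shared value, then tests the total against 3.
import Mathlib
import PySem

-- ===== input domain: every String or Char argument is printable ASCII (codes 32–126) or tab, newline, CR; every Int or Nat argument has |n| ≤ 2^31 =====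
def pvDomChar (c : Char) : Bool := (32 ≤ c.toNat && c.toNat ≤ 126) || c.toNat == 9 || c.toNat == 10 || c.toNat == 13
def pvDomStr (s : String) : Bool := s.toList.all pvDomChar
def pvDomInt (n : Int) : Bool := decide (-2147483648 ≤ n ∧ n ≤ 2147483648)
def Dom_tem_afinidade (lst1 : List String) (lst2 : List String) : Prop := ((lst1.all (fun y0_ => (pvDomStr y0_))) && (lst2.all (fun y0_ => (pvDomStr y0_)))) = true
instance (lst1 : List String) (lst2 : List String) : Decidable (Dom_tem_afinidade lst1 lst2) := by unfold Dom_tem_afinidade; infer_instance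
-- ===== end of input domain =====

-- B sorts copies of both lists and counts matching pairs by a two-pointer merge over equal runs (faster than A's nested scans).

-- ===== PORT A =====
def tem_afinidade (lst1 : List String) (lst2 : List String) : Bool :=
  let afinidades : Int :=
    lst1.foldl (fun acc artista_1 =>
      lst2.foldl (fun acc2 artista_2 =>
        if artista_1 == artista_2 then acc2 + 1 else acc2) acc) 0
  let saida := false
  let saida := if afinidades ≥ 3 then true else saida
  saida

-- ===== PORT B =====
-- the two-pointer merge loop of Source B, on the remaining suffixes of the two sorted
-- lists; "advance i (resp. j) past the run of v" is takeWhile/dropWhile on the suffix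
def pvMergeCount : List String → List String → Int
  | [], _ => 0
  | _ :: _, [] => 0
  | x :: xs, y :: ys =>
    if x == y then
      let a : Int := 1 + ((xs.takeWhile (fun z => z == x)).length : Int)
      let b : Int := 1 + ((ys.takeWhile (fun z => z == y)).length : Int)
      a * b + pvMergeCount (xs.dropWhile (fun z => z == x)) (ys.dropWhile (fun z => z == y))
    else if x < y then
      pvMergeCount xs (y :: ys)
    else
      pvMergeCount (x :: xs) ys
termination_by l1 l2 => l1.length + l2.length
decreasing_by
  all_goals
    have h1 := List.length_dropWhile_le (fun z => z == x) xs
    have h2 := List.length_dropWhile_le (fun z => z == y) ys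
    simp only [List.length_cons]
    omega

def tem_afinidade_alt (lst1 : List String) (lst2 : List String) : Bool :=
  let a := PySem.List.sorted lst1 (fun x => x) false
  let b := PySem.List.sorted lst2 (fun x => x) false
  let total := pvMergeCount a b
  decide (total ≥ 3)

-- ===== PRECONDITION & SPEC =====
def Spec_tem_afinidade (lst1 : List String) (lst2 : List String) (out : Bool) : Prop := out = tem_afinidade_alt lst1 lst2
instance (lst1 : List String) (lst2 : List String) (out : Bool) : Decidable (Spec_tem_afinidade lst1 lst2 out) := by unfold Spec_tem_afinidade; infer_instance

-- ===== CLAIM (what is proved, stated in full; the proofs are below) =====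
def Claim_equal_tem_afinidade : Prop := ∀ (lst1 : List String) (lst2 : List String), Dom_tem_afinidade lst1 lst2 → Spec_tem_afinidade lst1 lst2 (tem_afinidade lst1 lst2)

-- ===== LEMMAS AND PROOFS =====

/-- total matching pairs: Σ_{x ∈ l1} count_{l2} x, as an Int -/
def pvPairSum (l1 l2 : List String) : Int := (l1.map (fun x => (l2.count x : Int))).sum

theorem inner_count (lst2 : List String) (x : String) (acc : Int) :
    lst2.foldl (fun a y => if x == y then a + 1 else a) acc = acc + (lst2.count x : Int) := by
  induction lst2 generalizing acc with
  | nil => simp [List.count]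
  | cons h t ih =>
    simp only [List.foldl, ih, List.count_cons]
    by_cases hx : x = h
    · simp [hx]; ring
    · have : (h == x) = false := by simpa [beq_iff_eq] using fun e => hx e.symm
      simp [hx, this]

theorem a_eq_pairSum (lst1 lst2 : List String) (acc : Int) :
    lst1.foldl (fun acc artista_1 =>
      lst2.foldl (fun acc2 artista_2 =>
        if artista_1 == artista_2 then acc2 + 1 else acc2) acc) acc
    = acc + pvPairSum lst1 lst2 := by
  induction lst1 generalizing acc with
  | nil => simp [pvPairSum]
  | cons h t ih =>
    rw [List.foldl_cons, inner_count lst2 h acc, ih]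
    simp [pvPairSum]
    ring

theorem pairSum_perm {l1 l1' l2 l2' : List String} (h1 : l1'.Perm l1) (h2 : l2'.Perm l2) :
    pvPairSum l1' l2' = pvPairSum l1 l2 := by
  unfold pvPairSum
  have hmap : (l1'.map (fun x => (l2'.count x : Int))).Perm (l1.map (fun x => (l2'.count x : Int))) :=
    h1.map _
  have hfun : (l1.map (fun x => (l2'.count x : Int))) = l1.map (fun x => (l2.count x : Int)) := by
    apply List.map_congr_left
    intro x _
    exact congrArg _ (h2.count_eq x)
  rw [hmap.sum_eq, hfun]

theorem pairSum_congr_count {l1 l2 l2' : List String}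
    (h : ∀ z ∈ l1, l2.count z = l2'.count z) : pvPairSum l1 l2 = pvPairSum l1 l2' := by
  unfold pvPairSum
  congr 1
  apply List.map_congr_left
  intro z hz
  exact congrArg _ (h z hz)

theorem all_eq_takeWhile {x : String} (l : List String) :
    ∀ z ∈ l.takeWhile (fun z => z == x), z = x := by
  intro z hz
  have := List.mem_takeWhile_imp hz
  simpa using this

theorem gt_of_dropWhile {x : String} {l : List String}
    (hp : l.Pairwise (fun a b => a ≤ b)) (hge : ∀ z ∈ l, x ≤ z) :
    ∀ z ∈ l.dropWhile (fun z => z == x), x < z := by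
  intro z hz
  rcases hd : l.dropWhile (fun z => z == x) with _ | ⟨h, t⟩
  · simp [hd] at hz
  · have hhead : ¬ ((h == x) = true) := by
      have h0 := List.head?_dropWhile_not (fun z => z == x) l
      rw [hd] at h0
      simpa using h0
    have hmemh : h ∈ l := (List.dropWhile_sublist _).subset (by rw [hd]; exact List.mem_cons_self ..)
    have hxh : x < h := lt_of_le_of_ne (hge h hmemh) (by
      intro e; exact hhead (by simp [e.symm]))
    rw [hd] at hz
    rcases List.mem_cons.mp hz with hz' | hz'
    · exact hz' ▸ hxh
    · have hp' : (l.dropWhile (fun z => z == x)).Pairwise (fun a b => a ≤ b) :=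
        hp.sublist (List.dropWhile_sublist _)
      rw [hd] at hp'
      have := (List.pairwise_cons.mp hp').1 z hz'
      exact lt_of_lt_of_le hxh this

theorem count_eq_zero_of_gt {x : String} {l : List String}
    (h : ∀ z ∈ l, x < z) : l.count x = 0 := by
  rw [List.count_eq_zero]
  intro hm
  exact lt_irrefl x (h x hm)

theorem count_eq_zero_of_all_eq {x z : String} {l : List String}
    (hall : ∀ w ∈ l, w = x) (hne : z ≠ x) : l.count z = 0 := by
  rw [List.count_eq_zero]
  intro hm
  exact hne (hall z hm)

theorem count_takeWhile_all {x : String} (l : List String) :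
    (l.takeWhile (fun z => z == x)).count x = (l.takeWhile (fun z => z == x)).length := by
  apply List.count_eq_length.mpr
  intro z hz
  simpa [eq_comm] using all_eq_takeWhile l z hz

theorem sum_const_of_all {l : List String} {x : String} (f : String → Int)
    (h : ∀ z ∈ l, z = x) : (l.map f).sum = (l.length : Int) * f x := by
  induction l with
  | nil => simp
  | cons a t ih =>
    have ha := h a (by simp)
    have ht : ∀ z ∈ t, z = x := fun z hz => h z (by simp [hz])
    simp [ih ht, ha]
    ring

theorem pairSum_takeWhile_split (x : String) (xs l2 : List String) :
    pvPairSum xs l2 =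
      ((xs.takeWhile (fun z => z == x)).length : Int) * (l2.count x : Int)
        + pvPairSum (xs.dropWhile (fun z => z == x)) l2 := by
  conv_lhs => rw [← List.takeWhile_append_dropWhile (p := fun z => z == x) (l := xs)]
  unfold pvPairSum
  rw [List.map_append, List.sum_append]
  congr 1
  exact sum_const_of_all _ (all_eq_takeWhile xs)

theorem mergeCount_eq_pairSum_aux : ∀ (n : Nat) (l1 l2 : List String),
    l1.length + l2.length ≤ n →
    l1.Pairwise (fun a b => a ≤ b) → l2.Pairwise (fun a b => a ≤ b) →
    pvMergeCount l1 l2 = pvPairSum l1 l2 := by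
  intro n
  induction n with
  | zero =>
    intro l1 l2 hn _ _
    have e1 : l1 = [] := List.eq_nil_of_length_eq_zero (by omega)
    subst e1
    simp [pvMergeCount, pvPairSum]
  | succ n ih =>
    intro l1 l2 hn h1 h2
    match l1, l2 with
    | [], l2 => simp [pvMergeCount, pvPairSum]
    | x :: xs, [] =>
      simp only [pvMergeCount]
      unfold pvPairSum
      simp [List.count_nil]
    | x :: xs, y :: ys =>
      have hgex : ∀ z ∈ xs, x ≤ z := (List.pairwise_cons.mp h1).1
      have hpx : xs.Pairwise (fun a b => a ≤ b) := (List.pairwise_cons.mp h1).2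
      have hgey : ∀ z ∈ ys, y ≤ z := (List.pairwise_cons.mp h2).1
      have hpy : ys.Pairwise (fun a b => a ≤ b) := (List.pairwise_cons.mp h2).2
      simp only [pvMergeCount]
      by_cases hxy : x = y
      · subst hxy
        simp only [beq_self_eq_true, if_true]
        set xs' := xs.dropWhile (fun z => z == x) with hxs'
        set ys' := ys.dropWhile (fun z => z == x) with hys'
        have hlx : xs'.length ≤ xs.length := by
          rw [hxs']; exact List.length_dropWhile_le _ _
        have hly : ys'.length ≤ ys.length := by
          rw [hys']; exact List.length_dropWhile_le _ _
        have hrec : pvMergeCount xs' ys' = pvPairSum xs' ys' := by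
          apply ih
          · simp only [List.length_cons] at hn; omega
          · exact hpx.sublist (List.dropWhile_sublist _)
          · exact hpy.sublist (List.dropWhile_sublist _)
        -- count of x in (x :: ys) is 1 + run length in ys
        have hgty : ∀ z ∈ ys', x < z := gt_of_dropWhile hpy hgey
        have hcnt : ((x :: ys).count x : Int)
            = 1 + ((ys.takeWhile (fun z => z == x)).length : Int) := by
          rw [List.count_cons]
          conv_lhs => rw [← List.takeWhile_append_dropWhile (p := fun z => z == x) (l := ys)]
          rw [List.count_append, count_takeWhile_all, count_eq_zero_of_gt hgty]
          simp only [beq_self_eq_true, if_true]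
          push_cast
          ring
        -- elements of xs' are > x, so their counts in (x :: ys) equal counts in ys'
        have hgtx : ∀ z ∈ xs', x < z := gt_of_dropWhile hpx hgex
        have hdropcnt : pvPairSum xs' (x :: ys) = pvPairSum xs' ys' := by
          apply pairSum_congr_count
          intro z hz
          have hzx : z ≠ x := ne_of_gt (hgtx z hz)
          rw [List.count_cons]
          conv_lhs => rw [← List.takeWhile_append_dropWhile (p := fun z => z == x) (l := ys)]
          rw [List.count_append, count_eq_zero_of_all_eq (all_eq_takeWhile ys) hzx,
            ← hys']
          simp [Ne.symm hzx]
        -- split the right-hand side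
        have hsplit := pairSum_takeWhile_split x xs (x :: ys)
        have hhead : pvPairSum (x :: xs) (x :: ys)
            = ((x :: ys).count x : Int) + pvPairSum xs (x :: ys) := by
          simp [pvPairSum]
        rw [hhead, hsplit, hdropcnt, hrec, hcnt]
        ring
      · have hbne : (x == y) = false := by simp [hxy]
        rw [hbne]
        simp only [Bool.false_eq_true, if_false]
        by_cases hlt : x < y
        · rw [if_pos hlt]
          have hrec : pvMergeCount xs (y :: ys) = pvPairSum xs (y :: ys) := by
            apply ih
            · simp only [List.length_cons] at hn ⊢; omega
            · exact hpx
            · exact h2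
          have hc0 : ((y :: ys).count x) = 0 := by
            apply count_eq_zero_of_gt
            intro z hz
            rcases List.mem_cons.mp hz with hz' | hz'
            · exact hz' ▸ hlt
            · exact lt_of_lt_of_le hlt (hgey z hz')
          have : pvPairSum (x :: xs) (y :: ys)
              = ((y :: ys).count x : Int) + pvPairSum xs (y :: ys) := by
            simp [pvPairSum]
          rw [hrec, this, hc0]
          simp
        · rw [if_neg hlt]
          have hylt : y < x := lt_of_le_of_ne (not_lt.mp hlt) (fun e => hxy e.symm)
          have hrec : pvMergeCount (x :: xs) ys = pvPairSum (x :: xs) ys := by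
            apply ih
            · simp only [List.length_cons] at hn ⊢; omega
            · exact h1
            · exact hpy
          rw [hrec]
          apply (pairSum_congr_count ?_).symm
          intro z hz
          have hyz : y < z := by
            rcases List.mem_cons.mp hz with hz' | hz'
            · exact hz' ▸ hylt
            · exact lt_of_lt_of_le hylt (hgex z hz')
          rw [List.count_cons]
          simp [ne_of_lt hyz]

theorem mergeCount_eq_pairSum (l1 l2 : List String)
    (h1 : l1.Pairwise (fun a b => a ≤ b)) (h2 : l2.Pairwise (fun a b => a ≤ b)) :
    pvMergeCount l1 l2 = pvPairSum l1 l2 :=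
  mergeCount_eq_pairSum_aux (l1.length + l2.length) l1 l2 le_rfl h1 h2

-- ===== VERDICT (by name: the statement is the Claim_ definition above) =====
theorem tem_afinidade_spec : Claim_equal_tem_afinidade := by
  intro lst1 lst2 _
  unfold Spec_tem_afinidade tem_afinidade tem_afinidade_alt
  have hm := mergeCount_eq_pairSum (PySem.List.sorted lst1 (fun x => x) false)
      (PySem.List.sorted lst2 (fun x => x) false)
      (PySem.List.sorted_pairwise ..) (PySem.List.sorted_pairwise ..)
  have hp : pvPairSum (PySem.List.sorted lst1 (fun x => x) false)
      (PySem.List.sorted lst2 (fun x => x) false) = pvPairSum lst1 lst2 :=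
    pairSum_perm (PySem.List.sorted_perm ..) (PySem.List.sorted_perm ..)
  simp only [a_eq_pairSum, hm, hp, zero_add]
  split_ifs with h
  · exact (decide_eq_true h).symm
  · exact (decide_eq_false h).symm
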